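-- pv_equiv track=rewrite | github.com/xxiaoxiong/AI-GeneralPlat | backend/app/services/agent/context_manager.py | _group_turns
-- ===== SOURCE A (Python) =====
-- from typing import List, Dict, Any, Optional, Tuple
--
-- def _group_turns(messages: List[Dict[str, str]]) -> List[List[Dict[str, str]]]:
--     """将消息按对话轮次分组"""
--     turns = []
--     current_turn = []
--     for m in messages:
--         current_turn.append(m)
--         if m.get("role") == "assistant":
--             turns.append(current_turn)
--             current_turn = []
--     if current_turn:
--         turns.append(current_turn)
--     return turns
-- ===== SOURCE B (Python) =====
-- from typing import List, Dict
--
-- def _group_turns(messages: List[Dict[str, str]]) -> List[List[Dict[str, str]]]: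
--     """Group messages into turns: two-phase index-then-slice version."""
--     bounds = [i for i, m in enumerate(messages) if m.get("role") == "assistant"]
--     turns = []
--     prev = 0
--     for b in bounds:
--         turns.append(messages[prev:b + 1])
--         prev = b + 1
--     if prev < len(messages):
--         turns.append(messages[prev:])
--     return turns
-- ===== Notes on version B (the rewrite author's own statement) =====
-- stated objective: alternative
-- what changed: Replaces A's single element-by-element pass with a mutable current-turn accumulator by a two-phase scheme: first collect the indices of assistant messages, then emit each turn as a slice between consecutive boundaries (plus a trailing partial slice).
import Mathlib
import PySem

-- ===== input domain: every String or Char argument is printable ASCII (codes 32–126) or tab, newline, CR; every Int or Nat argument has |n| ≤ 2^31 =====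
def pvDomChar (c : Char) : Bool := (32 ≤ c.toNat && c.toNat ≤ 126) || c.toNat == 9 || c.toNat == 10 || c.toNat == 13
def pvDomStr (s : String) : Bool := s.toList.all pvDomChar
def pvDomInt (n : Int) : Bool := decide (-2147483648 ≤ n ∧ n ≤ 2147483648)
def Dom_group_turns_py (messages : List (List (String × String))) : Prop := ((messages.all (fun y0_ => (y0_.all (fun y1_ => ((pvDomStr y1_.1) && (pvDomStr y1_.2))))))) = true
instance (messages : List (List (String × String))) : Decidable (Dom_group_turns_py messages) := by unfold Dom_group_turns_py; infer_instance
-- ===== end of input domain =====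

-- B differs from A in decomposition only (index table + slicing pass vs one accumulator pass); same values everywhere.

-- m.get("role"): first-match lookup in the association list (dict insertion order)
def pvRole (m : List (String × String)) : Option String :=
  (m.find? (fun p => p.1 == "role")).map Prod.snd

-- ===== PORT A =====
-- the for-loop of A, state = (turns, current_turn)
def aLoop (turns : List (List (List (String × String)))) (cur : List (List (String × String)))
    (ms : List (List (String × String))) : List (List (List (String × String))) :=
  match ms with
  | [] => if cur.isEmpty then turns else turns ++ [cur]   -- trailing 'if current_turn:'
  | m :: rest =>
      let cur' := cur ++ [m]
      if pvRole m == some "assistant" then aLoop (turns ++ [cur']) [] rest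
      else aLoop turns cur' rest

def group_turns_py (messages : List (List (String × String))) : List (List (List (String × String))) :=
  aLoop [] [] messages

-- ===== PORT B =====
-- phase 1: [i for i, m in enumerate(messages) if m.get("role") == "assistant"]
def bBounds (i : Nat) (ms : List (List (String × String))) : List Nat :=
  match ms with
  | [] => []
  | m :: rest => if pvRole m == some "assistant" then i :: bBounds (i + 1) rest else bBounds (i + 1) rest

-- phase 2: the for-loop over bounds, state = (turns, prev), then the trailing slice
def bLoop (messages : List (List (String × String))) (turns : List (List (List (String × String))))
    (prev : Nat) (bounds : List Nat) : List (List (List (String × String))) :=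
  match bounds with
  | [] => if prev < messages.length
          then turns ++ [PySem.List.slice messages (some (prev : Int)) none]   -- messages[prev:]
          else turns
  | b :: bs => bLoop messages
      (turns ++ [PySem.List.slice messages (some (prev : Int)) (some ((b : Int) + 1))])  -- messages[prev:b+1]
      (b + 1) bs

def group_turns_py_alt (messages : List (List (String × String))) : List (List (List (String × String))) :=
  bLoop messages [] 0 (bBounds 0 messages)

-- ===== PRECONDITION & SPEC =====
def Spec_group_turns_py (messages : List (List (String × String))) (out : List (List (List (String × String)))) : Prop := out = group_turns_py_alt messages
instance (messages : List (List (String × String))) (out : List (List (List (String × String)))) : Decidable (Spec_group_turns_py messages out) := by unfold Spec_group_turns_py; infer_instance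

-- ===== CLAIM (what is proved, stated in full; the proofs are below) =====
def Claim_equal_group_turns_py : Prop := ∀ (messages : List (List (String × String))), Dom_group_turns_py messages → Spec_group_turns_py messages (group_turns_py messages)

-- ===== LEMMAS AND PROOFS =====

theorem bLoop_eq_aLoop (messages : List (List (String × String))) :
    ∀ (ms : List (List (String × String))) (start prev : Nat)
      (turns : List (List (List (String × String)))),
      messages.drop prev = ms → start ≤ prev →
      bLoop messages turns start (bBounds prev ms)
        = aLoop turns ((messages.drop start).take (prev - start)) ms := by
  intro ms
  induction ms with
  | nil =>
      intro start prev turns hdrop hle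
      have hlen : messages.length ≤ prev := by
        by_contra h
        have := List.drop_eq_nil_iff.mp hdrop
        omega
      have htake : (messages.drop start).take (prev - start) = messages.drop start := by
        apply List.take_of_length_le
        simp [List.length_drop]; omega
      simp only [bBounds, bLoop, aLoop, htake]
      by_cases hs : start < messages.length
      · have hne : ¬ (messages.drop start).isEmpty := by
          simp [List.isEmpty_iff, List.drop_eq_nil_iff]; omega
        simp [hs, hne, PySem.List.slice_from_natCast]
      · have : (messages.drop start) = [] := List.drop_eq_nil_iff.mpr (by omega)
        simp [hs, this]
  | cons m rest ih =>
      intro start prev turns hdrop hle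
      have hplen : prev < messages.length := by
        by_contra h
        have : messages.drop prev = [] := List.drop_eq_nil_iff.mpr (by omega)
        rw [this] at hdrop; simp at hdrop
      have hdrop' : messages.drop (prev + 1) = rest := by
        have h := congrArg (fun l => List.drop 1 l) hdrop
        simpa [List.drop_drop, Nat.add_comm] using h
      have hget : messages[prev]? = some m := by
        have h0 : (messages.drop prev)[0]? = messages[prev]? := by
          simp [List.getElem?_drop]
        rw [← h0, hdrop]; rfl
      -- current turn extended by one element
      have hstep : ∀ k : Nat, k ≤ prev →
          (messages.drop k).take (prev + 1 - k) = (messages.drop k).take (prev - k) ++ [m] := by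
        intro k hk
        have h1 : prev + 1 - k = (prev - k) + 1 := by omega
        rw [h1, List.take_add_one]
        have h2 : (messages.drop k)[prev - k]? = some m := by
          rw [List.getElem?_drop]
          have : k + (prev - k) = prev := by omega
          rw [this, hget]
        rw [h2]; rfl
      by_cases ha : pvRole m == some "assistant"
      · simp only [bBounds, ha, if_pos, bLoop, aLoop]
        rw [ih (prev + 1) (prev + 1) _ hdrop' (Nat.le_refl _)]
        have hslice : PySem.List.slice messages (some (start : Int)) (some ((prev : Int) + 1))
            = (messages.drop start).take (prev - start) ++ [m] := by
          have hcast : ((prev : Int) + 1) = ((prev + 1 : Nat) : Int) := by push_cast; ring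
          rw [hcast, PySem.List.slice_natCast]
          have : prev + 1 - start = prev + 1 - start := rfl
          rw [show prev + 1 - start = prev + 1 - start from rfl]
          exact hstep start hle
        simp [hslice]
      · have hb : (pvRole m == some "assistant") = false := by simpa using ha
        simp only [bBounds, aLoop, hb, Bool.false_eq_true, if_false]
        rw [ih start (prev + 1) turns hdrop' (by omega), hstep start hle]

-- ===== VERDICT (by name: the statement is the Claim_ definition above) =====
theorem group_turns_py_spec : Claim_equal_group_turns_py := by
  intro messages _
  unfold Spec_group_turns_py group_turns_py group_turns_py_alt
  have h := bLoop_eq_aLoop messages messages 0 0 [] (by simp) (Nat.le_refl 0)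
  simp only [List.drop_zero, Nat.sub_self, List.take_zero] at h
  exact h.symm
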